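-- pv_equiv track=rewrite | github.com/Yadhuvtk/iDChatbot | core/pipeline.py | _merge_split_words
-- ===== SOURCE A (Python) =====
-- from typing import Any, Dict, List, Optional, Tuple
--
-- def _merge_split_words(tokens: List[str], vocab_set: set) -> List[str]:
--     out = []
--     i = 0
--     while i < len(tokens):
--         if i + 1 < len(tokens):
--             merged = tokens[i] + tokens[i + 1]
--             if merged in vocab_set:
--                 out.append(merged)
--                 i += 2
--                 continue
--         out.append(tokens[i])
--         i += 1
--     return out
-- ===== SOURCE B (Python) =====
-- def _merge_split_words(tokens, vocab_set):
--     out = []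
--     pending = None
--     for t in tokens:
--         if pending is not None and pending + t in vocab_set:
--             out.append(pending + t)
--             pending = None
--         else:
--             if pending is not None:
--                 out.append(pending)
--             pending = t
--     if pending is not None:
--         out.append(pending)
--     return out
-- ===== Notes on version B (the rewrite author's own statement) =====
-- stated objective: alternative
-- what changed: Replaced the index-based while loop with i+=2 skip logic by a single for-loop over the tokens that threads a one-token pending buffer and flushes it at the end.
import Mathlib
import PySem

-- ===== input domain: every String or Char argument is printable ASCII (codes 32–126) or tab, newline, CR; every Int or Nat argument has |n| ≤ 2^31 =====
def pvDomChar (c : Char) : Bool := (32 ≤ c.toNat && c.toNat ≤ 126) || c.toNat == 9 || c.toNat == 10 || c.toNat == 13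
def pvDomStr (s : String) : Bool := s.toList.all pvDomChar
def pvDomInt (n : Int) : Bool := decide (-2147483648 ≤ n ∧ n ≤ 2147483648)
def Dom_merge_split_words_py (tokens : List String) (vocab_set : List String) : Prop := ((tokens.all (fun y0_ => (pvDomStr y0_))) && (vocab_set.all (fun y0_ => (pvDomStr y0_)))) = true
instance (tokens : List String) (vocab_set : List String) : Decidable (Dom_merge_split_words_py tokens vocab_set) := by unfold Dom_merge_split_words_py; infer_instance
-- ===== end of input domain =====

-- B replaces A's index-arithmetic while loop (with its i+=2 double advance) by a single
-- forward pass threading a one-token pending buffer; same cost, different decomposition.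

-- ===== PORT A =====
-- A's while loop over the index i, appending to out; literal transliteration.
def mswLoopA (tokens vocab_set : List String) (out : List String) (i : Nat) : List String :=
  if i < tokens.length then
    if i + 1 < tokens.length && vocab_set.contains (tokens.getD i "" ++ tokens.getD (i+1) "") then
      mswLoopA tokens vocab_set (out ++ [tokens.getD i "" ++ tokens.getD (i+1) ""]) (i + 2)
    else
      mswLoopA tokens vocab_set (out ++ [tokens.getD i ""]) (i + 1)
  else out
termination_by tokens.length - i
decreasing_by all_goals omega

def merge_split_words_py (tokens : List String) (vocab_set : List String) : List String :=
  mswLoopA tokens vocab_set [] 0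

-- ===== PORT B =====
-- one step of B's for-loop: state = (out, pending)
def mswStepB (vocab_set : List String) (s : List String × Option String) (t : String) :
    List String × Option String :=
  match s.2 with
  | some p =>
      if vocab_set.contains (p ++ t) then (s.1 ++ [p ++ t], none)
      else (s.1 ++ [p], some t)
  | none => (s.1, some t)

def merge_split_words_py_alt (tokens : List String) (vocab_set : List String) : List String :=
  let s := tokens.foldl (mswStepB vocab_set) ([], none)
  match s.2 with
  | some p => s.1 ++ [p]
  | none => s.1

-- ===== PRECONDITION & SPEC =====
def Spec_merge_split_words_py (tokens : List String) (vocab_set : List String) (out : List String) : Prop := out = merge_split_words_py_alt tokens vocab_set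
instance (tokens : List String) (vocab_set : List String) (out : List String) : Decidable (Spec_merge_split_words_py tokens vocab_set out) := by unfold Spec_merge_split_words_py; infer_instance

-- ===== CLAIM (what is proved, stated in full; the proofs are below) =====
def Claim_equal_merge_split_words_py : Prop := ∀ (tokens : List String) (vocab_set : List String), Dom_merge_split_words_py tokens vocab_set → Spec_merge_split_words_py tokens vocab_set (merge_split_words_py tokens vocab_set)

-- ===== LEMMAS AND PROOFS =====

-- proof-only reference recursion: greedy pairing written as structural recursion on a list
def mswG (vocab_set out : List String) : List String → List String
  | [] => out
  | [a] => out ++ [a]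
  | a :: b :: rest =>
      if vocab_set.contains (a ++ b) then mswG vocab_set (out ++ [a ++ b]) rest
      else mswG vocab_set (out ++ [a]) (b :: rest)

-- finalize B's state
def mswFin (s : List String × Option String) : List String :=
  match s.2 with
  | some p => s.1 ++ [p]
  | none => s.1

theorem mswLoopA_eq_G (tokens vocab_set : List String) :
    ∀ n i out, tokens.length - i ≤ n →
      mswLoopA tokens vocab_set out i = mswG vocab_set out (tokens.drop i) := by
  intro n
  induction n with
  | zero =>
      intro i out h
      have hi : ¬ i < tokens.length := by omega
      rw [mswLoopA, if_neg hi, List.drop_eq_nil_of_le (by omega), mswG]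
  | succ n ih =>
      intro i out h
      by_cases hi : i < tokens.length
      · have hdi : tokens.drop i = tokens[i] :: tokens.drop (i+1) :=
          List.drop_eq_getElem_cons hi
        have hgi : tokens.getD i "" = tokens[i] := List.getD_eq_getElem _ _ hi
        by_cases hi1 : i + 1 < tokens.length
        · have hdi1 : tokens.drop (i+1) = tokens[i+1] :: tokens.drop (i+2) :=
            List.drop_eq_getElem_cons hi1
          have hgi1 : tokens.getD (i+1) "" = tokens[i+1] := List.getD_eq_getElem _ _ hi1
          by_cases hc : (tokens[i] ++ tokens[i+1]) ∈ vocab_set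
          · rw [mswLoopA, if_pos hi, if_pos (by simp [List.getElem?_eq_getElem, hi, hi1, hc]),
                ih (i+2) _ (by omega), hdi, hdi1, mswG, if_pos (by simpa using hc), hgi, hgi1]
          · rw [mswLoopA, if_pos hi, if_neg (by simp [List.getElem?_eq_getElem, hi, hi1, hc]),
                ih (i+1) _ (by omega), hdi, hdi1, mswG,
                if_neg (by simpa using hc), hgi, ← hdi1]
        · have hd1 : tokens.drop (i+1) = [] := List.drop_eq_nil_of_le (by omega)
          rw [mswLoopA, if_pos hi, if_neg (by simp [hi1]),
              ih (i+1) _ (by omega), hdi, hd1, mswG, mswG, hgi]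
      · rw [mswLoopA, if_neg hi, List.drop_eq_nil_of_le (by omega), mswG]

theorem mswFoldB_eq_G (vocab_set : List String) :
    ∀ n (l : List String), l.length ≤ n → ∀ out,
      mswFin (l.foldl (mswStepB vocab_set) (out, none)) = mswG vocab_set out l := by
  intro n
  induction n with
  | zero =>
      intro l h out
      have : l = [] := List.eq_nil_of_length_eq_zero (by omega)
      subst this; rfl
  | succ n ih =>
      intro l h out
      match l with
      | [] => rfl
      | a :: rest =>
          have hstep : mswStepB vocab_set (out, none) a = (out, some a) := rfl
          rw [List.foldl_cons, hstep]
          match rest with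
          | [] => rfl
          | b :: rest' =>
              rw [List.foldl_cons]
              by_cases hc : (a ++ b) ∈ vocab_set
              · have : mswStepB vocab_set (out, some a) b = (out ++ [a ++ b], none) := by
                  simp [mswStepB, hc]
                rw [this, ih rest' (by simp at h ⊢; omega) (out ++ [a ++ b]),
                    mswG, if_pos (by simpa using hc)]
              · have : mswStepB vocab_set (out, some a) b = (out ++ [a], some b) := by
                  simp [mswStepB, hc]
                rw [this]
                have hb : mswStepB vocab_set (out ++ [a], none) b = (out ++ [a], some b) := rfl
                rw [← hb, ← List.foldl_cons,
                    ih (b :: rest') (by simp at h ⊢; omega) (out ++ [a]),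
                    mswG, if_neg (by simpa using hc)]

-- ===== VERDICT (by name: the statement is the Claim_ definition above) =====
theorem merge_split_words_py_spec : Claim_equal_merge_split_words_py := by
  intro tokens vocab_set _
  unfold Spec_merge_split_words_py merge_split_words_py merge_split_words_py_alt
  rw [mswLoopA_eq_G tokens vocab_set tokens.length 0 [] (by omega)]
  rw [show tokens.drop 0 = tokens from rfl]
  exact (mswFoldB_eq_G vocab_set tokens.length tokens (le_refl _) []).symm
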